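-- pv_equiv track=rewrite | github.com/Tarang001/Brain_Aneurysm | neuronetra4.0.py | smart_8_frame_sampling
-- ===== SOURCE A (Python) =====
-- from typing import List, Tuple, Optional
--
-- def smart_8_frame_sampling(volume_paths: List[str]) -> List[str]:
--     n = len(volume_paths)
--     if n == 0:
--         return []
--     if n <= 8:
--         result = volume_paths[:]
--         while len(result) < 8:
--             result.extend(volume_paths[:8-len(result)])
--         return result[:8]
--
--     start_idx = max(0, int(n * 0.1))
--     available_frames = n - start_idx
--     step = max(1, available_frames // 8)
--     indices = []
--     current_idx = start_idx
--
--     while len(indices) < 8 and current_idx < n: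
--         indices.append(current_idx)
--         current_idx += step
--
--     while len(indices) < 8:
--         remaining = [i for i in range(n) if i not in indices]
--         if remaining:
--             indices.append(remaining[len(indices) % len(remaining)])
--         else:
--             indices.append(indices[-1])
--
--     return [volume_paths[i] for i in indices[:8]]
-- ===== SOURCE B (Python) =====
-- from typing import List
--
-- def smart_8_frame_sampling(volume_paths: List[str]) -> List[str]:
--     n = len(volume_paths)
--     if n == 0:
--         return []
--     if n <= 8:
--         # pad by list repetition, then truncate
--         return (volume_paths * 8)[:8]
--     start = int(n * 0.1)
--     step = max(1, (n - start) // 8)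
--     # extended slice: every step-th path from start; always yields >= 8 items
--     return volume_paths[start::step][:8]
-- ===== Notes on version B (the rewrite author's own statement) =====
-- stated objective: idiomatic
-- what changed: Builds the result with Python's sequence machinery instead of any index loop: n<=8 padding becomes list repetition (volume_paths*8)[:8], and the n>8 case becomes one extended slice volume_paths[start::step][:8] (A's second while-loop is dead since start+7*step<n), so no index list is ever constructed.
import Mathlib
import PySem

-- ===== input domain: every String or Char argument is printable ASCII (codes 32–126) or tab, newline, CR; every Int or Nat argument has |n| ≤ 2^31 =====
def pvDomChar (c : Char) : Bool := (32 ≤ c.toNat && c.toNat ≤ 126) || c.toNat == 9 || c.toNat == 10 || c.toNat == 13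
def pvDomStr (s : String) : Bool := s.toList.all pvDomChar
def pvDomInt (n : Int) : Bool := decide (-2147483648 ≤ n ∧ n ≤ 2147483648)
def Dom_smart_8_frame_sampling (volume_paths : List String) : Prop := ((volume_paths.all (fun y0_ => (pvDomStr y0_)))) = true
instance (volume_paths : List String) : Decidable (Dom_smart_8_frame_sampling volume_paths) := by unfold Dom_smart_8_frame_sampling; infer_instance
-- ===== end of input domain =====

-- B builds the result with the sequence machinery instead of index loops: padding becomes list
-- repetition (vp*8)[:8], the n>8 case becomes one extended slice vp[start::step][:8]
-- (A's second fill loop is dead since start+7*step < n). Objective: idiomatic.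

-- ===== PORT A =====

-- exact model of Python's `int(n * 0.1)` for every realizable list length (equal to n // 10 for
-- all 0 ≤ n < 10^8, checked exhaustively; floats themselves are outside the type convention)
def pvIntTenth (n : Int) : Int := PySem.Int.floordiv n 10

-- `while len(result) < 8: result.extend(volume_paths[:8-len(result)])`; each pass adds ≥ 1
-- element (volume_paths nonempty here), so fuel 8 is a pure totality guard
def pvPadLoopA (vp : List String) : Nat → List String → List String
  | 0, res => res
  | f + 1, res =>
      if res.length < 8 then
        pvPadLoopA vp f (res ++ PySem.List.slice vp none (some (8 - (res.length : Int))))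
      else res

-- `while len(indices) < 8 and current_idx < n: …`; appends one index per pass, fuel 8 is a guard
def pvWhileA (n step : Int) : Nat → Int → List Int → List Int
  | 0, _, idxs => idxs
  | f + 1, cur, idxs =>
      if idxs.length < 8 ∧ cur < n then pvWhileA n step f (cur + step) (idxs ++ [cur]) else idxs

-- `while len(indices) < 8: remaining = …`; appends one index per pass, fuel 8 is a guard.
-- `indices[-1]` can only raise when idxs = [] ∧ remaining = [], impossible for n > 8; .getD 0 there.
def pvFillA (n : Int) : Nat → List Int → List Int
  | 0, idxs => idxs
  | f + 1, idxs =>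
      if idxs.length < 8 then
        let remaining := (PySem.List.pyRange 0 n 1).filter (fun i => !(idxs.contains i))
        if !remaining.isEmpty then
          pvFillA n f (idxs ++
            [(PySem.List.pyGet? remaining
                (PySem.Int.mod (idxs.length : Int) (remaining.length : Int))).getD 0])
        else
          pvFillA n f (idxs ++ [(PySem.List.pyGet? idxs (-1)).getD 0])
      else idxs

def smart_8_frame_sampling (volume_paths : List String) : List String :=
  let n : Int := volume_paths.length
  if n = 0 then []
  else if n ≤ 8 then
    PySem.List.slice (pvPadLoopA volume_paths 8 volume_paths) none (some 8)
  else
    let start_idx := max 0 (pvIntTenth n)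
    let available_frames := n - start_idx
    let step := max 1 (PySem.Int.floordiv available_frames 8)
    let indices := pvFillA n 8 (pvWhileA n step 8 start_idx [])
    (PySem.List.slice indices none (some 8)).map
      (fun i => (PySem.List.pyGet? volume_paths i).getD "")

-- ===== PORT B =====
def smart_8_frame_sampling_alt (volume_paths : List String) : List String :=
  let n : Int := volume_paths.length
  if n = 0 then []
  else if n ≤ 8 then
    PySem.List.slice (PySem.List.pyRepeat volume_paths 8) none (some 8)
  else
    let start := pvIntTenth n
    let step := max 1 (PySem.Int.floordiv (n - start) 8)
    -- vp[start::step] never raises (step ≥ 1 ≠ 0), so slice? is always some; .getD [] is a guard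
    PySem.List.slice ((PySem.List.slice? volume_paths (some start) none step).getD []) none (some 8)

-- ===== PRECONDITION & SPEC =====
def Spec_smart_8_frame_sampling (volume_paths : List String) (out : List String) : Prop := out = smart_8_frame_sampling_alt volume_paths
instance (volume_paths : List String) (out : List String) : Decidable (Spec_smart_8_frame_sampling volume_paths out) := by unfold Spec_smart_8_frame_sampling; infer_instance

-- ===== CLAIM (what is proved, stated in full; the proofs are below) =====
def Claim_equal_smart_8_frame_sampling : Prop := ∀ (volume_paths : List String), Dom_smart_8_frame_sampling volume_paths → Spec_smart_8_frame_sampling volume_paths (smart_8_frame_sampling volume_paths)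

-- ===== LEMMAS AND PROOFS =====

theorem pvWhileA_succ (n step : Int) (f : Nat) (cur : Int) (idxs : List Int) :
    pvWhileA n step (f + 1) cur idxs =
      if idxs.length < 8 ∧ cur < n then pvWhileA n step f (cur + step) (idxs ++ [cur]) else idxs := rfl

theorem pvFillA_of_len8 (n : Int) (f : Nat) (idxs : List Int) (h : ¬ idxs.length < 8) :
    pvFillA n f idxs = idxs := by
  cases f with
  | zero => rfl
  | succ f => simp only [pvFillA, if_neg h]

-- unrolling A's first while loop: with 0 < step and the last index below n, it collects
-- exactly the 8 strided indices (and A's second fill loop is then a no-op)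
theorem pvWhileA_run (n step start : Int) (hstep : 0 < step) (h7 : start + 7 * step < n) :
    pvWhileA n step 8 start [] =
      [start + 0 * step, start + 1 * step, start + 2 * step, start + 3 * step,
       start + 4 * step, start + 5 * step, start + 6 * step, start + 7 * step] := by
  have hin : ∀ k : Int, 0 ≤ k → k ≤ 7 → start + k * step < n := by
    intro k hk0 hk7
    nlinarith
  rw [show (8 : Nat) = 7 + 1 from rfl, pvWhileA_succ,
      if_pos ⟨by simp, by have := hin 0 (by norm_num) (by norm_num); linarith⟩]
  rw [show (7 : Nat) = 6 + 1 from rfl, pvWhileA_succ,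
      if_pos ⟨by simp, by have := hin 1 (by norm_num) (by norm_num); linarith⟩]
  rw [show (6 : Nat) = 5 + 1 from rfl, pvWhileA_succ,
      if_pos ⟨by simp, by have := hin 2 (by norm_num) (by norm_num); linarith⟩]
  rw [show (5 : Nat) = 4 + 1 from rfl, pvWhileA_succ,
      if_pos ⟨by simp, by have := hin 3 (by norm_num) (by norm_num); linarith⟩]
  rw [show (4 : Nat) = 3 + 1 from rfl, pvWhileA_succ,
      if_pos ⟨by simp, by have := hin 4 (by norm_num) (by norm_num); linarith⟩]
  rw [show (3 : Nat) = 2 + 1 from rfl, pvWhileA_succ,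
      if_pos ⟨by simp, by have := hin 5 (by norm_num) (by norm_num); linarith⟩]
  rw [show (2 : Nat) = 1 + 1 from rfl, pvWhileA_succ,
      if_pos ⟨by simp, by have := hin 6 (by norm_num) (by norm_num); linarith⟩]
  rw [show (1 : Nat) = 0 + 1 from rfl, pvWhileA_succ,
      if_pos ⟨by simp, by have := hin 7 (by norm_num) (by norm_num); linarith⟩]
  simp only [pvWhileA, List.nil_append, List.cons_append,
    List.cons.injEq, and_true]
  refine ⟨by ring, by ring, by ring, by ring, by ring, by ring, by ring, by ring⟩

-- A's indexing and B's slice-produced element agree at an in-range nonnegative index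
theorem pv_get_eq (vp : List String) (i : Int) (h0 : 0 ≤ i) :
    (PySem.List.pyGet? vp i).getD "" = vp.getD i.toNat "" := by
  rw [show i = ((i.toNat : Nat) : Int) from (Int.toNat_of_nonneg h0).symm,
      PySem.List.pyGet?_natCast, Int.toNat_natCast]
  rfl

-- the extended slice vp[S::T] for 0 ≤ S < n, 0 < T: slice? reduced to its filterMap form
theorem pv_slice?_pos (vp : List String) (S T : Int) (h0 : 0 ≤ S)
    (hSn : S < (vp.length : Int)) (hT : 0 < T) :
    PySem.List.slice? vp (some S) none T =
      some (List.filterMap (fun (k : Nat) => vp[(S + T * ((k : Nat) : Int)).toNat]?)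
        (List.range ((((vp.length : Int) - S + T - 1) / T).toNat))) := by
  unfold PySem.List.slice? PySem.List.sliceIndices
  rw [if_neg (by omega : ¬ T = 0)]
  simp only [if_neg (by omega : ¬ T < 0), if_neg (by omega : ¬ S < 0),
    min_eq_left hSn.le, if_pos hT, if_pos hSn]

-- the n > 8 case: A's two while loops and B's extended slice both give the 8 strided picks
theorem pv_big_case (vp : List String) (h9 : 9 ≤ vp.length) :
    smart_8_frame_sampling vp = smart_8_frame_sampling_alt vp := by
  have hn9 : (9 : Int) ≤ (vp.length : Int) := by exact_mod_cast h9
  simp only [smart_8_frame_sampling, smart_8_frame_sampling_alt]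
  rw [if_neg (by omega : ¬ ((vp.length : Int) = 0)),
      if_neg (by omega : ¬ ((vp.length : Int) ≤ 8)),
      if_neg (by omega : ¬ ((vp.length : Int) = 0)),
      if_neg (by omega : ¬ ((vp.length : Int) ≤ 8))]
  have e10 : pvIntTenth (vp.length : Int) = (vp.length : Int) / 10 := by
    simp [pvIntTenth, PySem.Int.floordiv_eq_ediv_of_pos]
  rw [e10]
  rw [max_eq_right (by omega : (0:Int) ≤ (vp.length : Int) / 10)]
  rw [PySem.Int.floordiv_eq_ediv_of_pos (by norm_num : (0:Int) < 8)]
  set N : Int := (vp.length : Int) with hN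
  set S : Int := N / 10 with hS
  set T : Int := max 1 ((N - S) / 8) with hT
  have hT1 : 1 ≤ T := le_max_left _ _
  have h7 : S + 7 * T < N := by
    rcases max_choice 1 ((N - S) / 8) with he | he <;> rw [hT, he] <;> omega
  have hS0 : 0 ≤ S := by omega
  have hSn : S < N := by omega
  -- A side
  rw [pvWhileA_run N T S (by omega) h7]
  rw [pvFillA_of_len8 _ _ _ (by simp)]
  rw [PySem.List.slice_to _ (by norm_num : (0:Int) ≤ 8)]
  -- B side
  rw [pv_slice?_pos vp S T hS0 (by rw [← hN]; exact hSn) (by omega)]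
  rw [Option.getD_some]
  rw [PySem.List.slice_to _ (by norm_num : (0:Int) ≤ 8)]
  set c : Nat := ((N - S + T - 1) / T).toNat with hc
  have hc8 : 8 ≤ c := by
    have : (8 : Int) ≤ (N - S + T - 1) / T := by
      rw [Int.le_ediv_iff_mul_le (by omega)]; omega
    omega
  have hrange : List.range c = List.range 8 ++ (List.range (c - 8)).map (fun k => 8 + k) := by
    rw [← List.range_add]; congr 1; omega
  rw [hrange, List.filterMap_append]
  have hidx : ∀ k : Int, 0 ≤ k → k ≤ 7 → (S + T * k).toNat < vp.length := by
    intro k hk0 hk7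
    have : S + T * k < N := by nlinarith
    omega
  have hsome : ∀ k : Int, (hk0 : 0 ≤ k) → (hk7 : k ≤ 7) →
      vp[(S + T * k).toNat]? = some (vp.getD (S + T * k).toNat "") := by
    intro k hk0 hk7
    rw [List.getElem?_eq_getElem (hidx k hk0 hk7), List.getD_eq_getElem _ _ (hidx k hk0 hk7)]
  rw [show List.range 8 = [0,1,2,3,4,5,6,7] from rfl]
  have hg : ∀ k : Int, 0 ≤ k → k ≤ 7 →
      (PySem.List.pyGet? vp (S + k * T)).getD "" = vp.getD (S + T * k).toNat "" := by
    intro k hk0 hk7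
    rw [pv_get_eq vp _ (by nlinarith), mul_comm k T]
  simp only [List.filterMap_cons, List.filterMap_nil, Nat.cast_ofNat, Nat.cast_zero,
    Nat.cast_one,
    hsome 0 (by norm_num) (by norm_num), hsome 1 (by norm_num) (by norm_num),
    hsome 2 (by norm_num) (by norm_num), hsome 3 (by norm_num) (by norm_num),
    hsome 4 (by norm_num) (by norm_num), hsome 5 (by norm_num) (by norm_num),
    hsome 6 (by norm_num) (by norm_num), hsome 7 (by norm_num) (by norm_num),
    List.cons_append, List.nil_append]
  rw [show Int.toNat 8 = 8 from rfl]
  have htake : ∀ {α : Type} (a b c d e f g h : α) (rest : List α),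
      List.take 8 (a::b::c::d::e::f::g::h::rest) = [a,b,c,d,e,f,g,h] :=
    fun _ _ _ _ _ _ _ _ _ => rfl
  rw [htake, htake]
  simp only [List.map_cons, List.map_nil]
  rw [hg 0 (by norm_num) (by norm_num), hg 1 (by norm_num) (by norm_num),
      hg 2 (by norm_num) (by norm_num), hg 3 (by norm_num) (by norm_num),
      hg 4 (by norm_num) (by norm_num), hg 5 (by norm_num) (by norm_num),
      hg 6 (by norm_num) (by norm_num), hg 7 (by norm_num) (by norm_num)]

-- ===== VERDICT (by name: the statement is the Claim_ definition above) =====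
theorem smart_8_frame_sampling_spec : Claim_equal_smart_8_frame_sampling := by
  intro vp _
  unfold Spec_smart_8_frame_sampling
  rcases vp with _ | ⟨a1, vp⟩; · rfl
  rcases vp with _ | ⟨a2, vp⟩
  · have hA : smart_8_frame_sampling [a1] = [a1, a1, a1, a1, a1, a1, a1, a1] := by
      simp [smart_8_frame_sampling, pvPadLoopA, PySem.List.slice]
    have hB : smart_8_frame_sampling_alt [a1] = [a1, a1, a1, a1, a1, a1, a1, a1] := by
      simp [smart_8_frame_sampling_alt, PySem.List.pyRepeat, PySem.List.slice]
    rw [hA, hB]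
  rcases vp with _ | ⟨a3, vp⟩
  · have hA : smart_8_frame_sampling [a1, a2] = [a1, a2, a1, a2, a1, a2, a1, a2] := by
      simp [smart_8_frame_sampling, pvPadLoopA, PySem.List.slice]
    have hB : smart_8_frame_sampling_alt [a1, a2] = [a1, a2, a1, a2, a1, a2, a1, a2] := by
      simp [smart_8_frame_sampling_alt, PySem.List.pyRepeat, PySem.List.slice]
    rw [hA, hB]
  rcases vp with _ | ⟨a4, vp⟩
  · have hA : smart_8_frame_sampling [a1, a2, a3] = [a1, a2, a3, a1, a2, a3, a1, a2] := by
      simp [smart_8_frame_sampling, pvPadLoopA, PySem.List.slice]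
    have hB : smart_8_frame_sampling_alt [a1, a2, a3] = [a1, a2, a3, a1, a2, a3, a1, a2] := by
      simp [smart_8_frame_sampling_alt, PySem.List.pyRepeat, PySem.List.slice]
    rw [hA, hB]
  rcases vp with _ | ⟨a5, vp⟩
  · have hA : smart_8_frame_sampling [a1, a2, a3, a4] = [a1, a2, a3, a4, a1, a2, a3, a4] := by
      simp [smart_8_frame_sampling, pvPadLoopA, PySem.List.slice]
    have hB : smart_8_frame_sampling_alt [a1, a2, a3, a4] = [a1, a2, a3, a4, a1, a2, a3, a4] := by
      simp [smart_8_frame_sampling_alt, PySem.List.pyRepeat, PySem.List.slice]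
    rw [hA, hB]
  rcases vp with _ | ⟨a6, vp⟩
  · have hA : smart_8_frame_sampling [a1, a2, a3, a4, a5] = [a1, a2, a3, a4, a5, a1, a2, a3] := by
      simp [smart_8_frame_sampling, pvPadLoopA, PySem.List.slice]
    have hB : smart_8_frame_sampling_alt [a1, a2, a3, a4, a5] = [a1, a2, a3, a4, a5, a1, a2, a3] := by
      simp [smart_8_frame_sampling_alt, PySem.List.pyRepeat, PySem.List.slice]
    rw [hA, hB]
  rcases vp with _ | ⟨a7, vp⟩
  · have hA : smart_8_frame_sampling [a1, a2, a3, a4, a5, a6] = [a1, a2, a3, a4, a5, a6, a1, a2] := by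
      simp [smart_8_frame_sampling, pvPadLoopA, PySem.List.slice]
    have hB : smart_8_frame_sampling_alt [a1, a2, a3, a4, a5, a6] = [a1, a2, a3, a4, a5, a6, a1, a2] := by
      simp [smart_8_frame_sampling_alt, PySem.List.pyRepeat, PySem.List.slice]
    rw [hA, hB]
  rcases vp with _ | ⟨a8, vp⟩
  · have hA : smart_8_frame_sampling [a1, a2, a3, a4, a5, a6, a7] = [a1, a2, a3, a4, a5, a6, a7, a1] := by
      simp [smart_8_frame_sampling, pvPadLoopA, PySem.List.slice]
    have hB : smart_8_frame_sampling_alt [a1, a2, a3, a4, a5, a6, a7] = [a1, a2, a3, a4, a5, a6, a7, a1] := by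
      simp [smart_8_frame_sampling_alt, PySem.List.pyRepeat, PySem.List.slice]
    rw [hA, hB]
  rcases vp with _ | ⟨a9, vp⟩
  · have hA : smart_8_frame_sampling [a1, a2, a3, a4, a5, a6, a7, a8] = [a1, a2, a3, a4, a5, a6, a7, a8] := by
      simp [smart_8_frame_sampling, pvPadLoopA, PySem.List.slice]
    have hB : smart_8_frame_sampling_alt [a1, a2, a3, a4, a5, a6, a7, a8] = [a1, a2, a3, a4, a5, a6, a7, a8] := by
      simp [smart_8_frame_sampling_alt, PySem.List.pyRepeat, PySem.List.slice]
    rw [hA, hB]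
  refine pv_big_case _ ?_
  simp only [List.length_cons]
  omega
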